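-- pv_equiv track=rewrite | github.com/kgateway-dev/kgateway.dev | scripts/generate-shared-types.py | extract_validation_annotations
-- ===== SOURCE A (Python) =====
-- def extract_validation_annotations(lines: list[str], end_line: int) -> list[str]:
--     """Extract kubebuilder validation annotations above a declaration."""
--     validations = []
--     i = end_line - 1
--     while i >= 0:
--         line = lines[i].strip()
--         if line.startswith("// +kubebuilder:validation:"):
--             # Extract the validation rule
--             rule = line.replace("// +kubebuilder:validation:", "")
--             validations.insert(0, rule)
--         elif line.startswith("//"):
--             pass  # Other comments, continue looking
--         elif line == "":
--             i -= 1
--             continue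
--         else:
--             break
--         i -= 1
--     return validations
-- ===== SOURCE B (Python) =====
-- def extract_validation_annotations(lines: list[str], end_line: int) -> list[str]:
--     """Extract kubebuilder validation annotations above a declaration."""
--     # Find the start of the comment block (blank lines and // comments) above end_line.
--     i = end_line - 1
--     while i >= 0:
--         s = lines[i].strip()
--         if s == "" or s.startswith("//"):
--             i -= 1
--         else:
--             break
--     start = i + 1
--     # Forward pass: keep only validation annotations, in order.
--     result = []
--     for j in range(start, end_line):
--         s = lines[j].strip()
--         if s.startswith("// +kubebuilder:validation:"):
--             result.append(s.replace("// +kubebuilder:validation:", ""))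
--     return result
-- ===== Notes on version B (the rewrite author's own statement) =====
-- stated objective: alternative
-- what changed: B first finds the start of the comment block with a backward boundary scan, then collects the validation rules in a separate forward filtering pass with append, instead of A's single backward scan that classifies each line and builds the result with insert(0,...).
import Mathlib
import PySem

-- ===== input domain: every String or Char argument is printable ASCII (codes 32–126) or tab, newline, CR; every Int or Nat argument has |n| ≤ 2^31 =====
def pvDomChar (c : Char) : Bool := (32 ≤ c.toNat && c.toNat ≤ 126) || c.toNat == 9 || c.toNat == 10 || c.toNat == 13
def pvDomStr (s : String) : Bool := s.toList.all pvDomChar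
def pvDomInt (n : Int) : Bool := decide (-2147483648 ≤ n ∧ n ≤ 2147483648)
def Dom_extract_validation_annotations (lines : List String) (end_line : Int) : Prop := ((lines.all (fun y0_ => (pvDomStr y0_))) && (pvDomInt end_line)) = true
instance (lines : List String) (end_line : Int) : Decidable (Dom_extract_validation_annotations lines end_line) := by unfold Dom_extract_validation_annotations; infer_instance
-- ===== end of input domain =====

-- B finds the comment-block start with a backward boundary scan, then collects the
-- validation rules in a separate forward filtering pass (alternative decomposition;
-- return value only, no mutation involved).

-- ===== PORT A =====
-- A's backward while-loop: fuel n+1 means current index i = n; fuel 0 means i < 0.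
def evaLoopA (lines : List String) : Nat → List String → List String
  | 0, acc => acc
  | n+1, acc =>
    let line := PySem.Str.strip ((PySem.List.pyGet? lines (n : Int)).getD "")
    if PySem.Str.startswith line "// +kubebuilder:validation:" then
      evaLoopA lines n (PySem.Str.replace line "// +kubebuilder:validation:" "" :: acc)
    else if PySem.Str.startswith line "//" then
      evaLoopA lines n acc
    else if line == "" then
      evaLoopA lines n acc
    else acc

def extract_validation_annotations (lines : List String) (end_line : Int) : List String :=
  evaLoopA lines end_line.toNat []

-- ===== PORT B =====
-- boundary scan: fuel n+1 means current index i = n; result is the block start index.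
def evaStartB (lines : List String) : Nat → Nat
  | 0 => 0
  | n+1 =>
    let s := PySem.Str.strip ((PySem.List.pyGet? lines (n : Int)).getD "")
    if s == "" || PySem.Str.startswith s "//" then evaStartB lines n else n+1

def extract_validation_annotations_alt (lines : List String) (end_line : Int) : List String :=
  let start : Int := (evaStartB lines end_line.toNat : Int)
  (PySem.List.pyRange start end_line 1).foldl
    (fun acc j =>
      let s := PySem.Str.strip ((PySem.List.pyGet? lines j).getD "")
      if PySem.Str.startswith s "// +kubebuilder:validation:" then
        acc ++ [PySem.Str.replace s "// +kubebuilder:validation:" ""]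
      else acc) []

-- ===== PRECONDITION & SPEC =====
-- Python A indexes lines[end_line-1] downward, so it raises IndexError exactly when
-- end_line > len(lines); those inputs are excluded.
def Pre_extract_validation_annotations (lines : List String) (end_line : Int) : Prop :=
  end_line ≤ (lines.length : Int)
instance (lines : List String) (end_line : Int) : Decidable (Pre_extract_validation_annotations lines end_line) := by unfold Pre_extract_validation_annotations; infer_instance

def pvWitness_extract_validation_annotations : List String × Int :=
  (["// +kubebuilder:validation:Required"], 1)

def Spec_extract_validation_annotations (lines : List String) (end_line : Int) (out : List String) : Prop := out = extract_validation_annotations_alt lines end_line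
instance (lines : List String) (end_line : Int) (out : List String) : Decidable (Spec_extract_validation_annotations lines end_line out) := by unfold Spec_extract_validation_annotations; infer_instance

-- ===== CLAIM (what is proved, stated in full; the proofs are below) =====
def Claim_equal_extract_validation_annotations : Prop := ∀ (lines : List String) (end_line : Int), Dom_extract_validation_annotations lines end_line → Pre_extract_validation_annotations lines end_line → Spec_extract_validation_annotations lines end_line (extract_validation_annotations lines end_line)

-- ===== LEMMAS AND PROOFS =====

-- B's fold step, named for the proofs.
def evaStep (lines : List String) (acc : List String) (j : Int) : List String :=
  let s := PySem.Str.strip ((PySem.List.pyGet? lines j).getD "")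
  if PySem.Str.startswith s "// +kubebuilder:validation:" then
    acc ++ [PySem.Str.replace s "// +kubebuilder:validation:" ""]
  else acc

-- B's forward pass as a function of the fuel, for fixed lines.
def evaFwd (lines : List String) (n : Nat) : List String :=
  (PySem.List.pyRange ((evaStartB lines n : Nat) : Int) (n : Int) 1).foldl (evaStep lines) []

theorem evaStartB_le (lines : List String) (n : Nat) : evaStartB lines n ≤ n := by
  induction n with
  | zero => simp [evaStartB]
  | succ n ih =>
    simp only [evaStartB]
    split
    · omega
    · omega

theorem startswith_val_imp_comment (s : String)
    (h : PySem.Str.startswith s "// +kubebuilder:validation:" = true) :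
    PySem.Str.startswith s "//" = true := by
  simp only [PySem.Str.startswith_eq, PySem.Chars.startswith_iff] at h ⊢
  exact List.IsPrefix.trans (by decide) h

theorem evaFwd_succ_of_skip (lines : List String) (n : Nat)
    (hS : evaStartB lines (n+1) = evaStartB lines n) :
    evaFwd lines (n+1) = evaStep lines (evaFwd lines n) (n : Int) := by
  have hle : ((evaStartB lines n : Nat) : Int) ≤ (n : Int) := by
    exact_mod_cast evaStartB_le lines n
  unfold evaFwd
  rw [hS]
  have : ((n + 1 : Nat) : Int) = (n : Int) + 1 := by push_cast; ring
  rw [this, PySem.List.pyRange_one_append ((evaStartB lines n : Nat) : Int) (n : Int)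
        ((n : Int) + 1) hle (by omega), PySem.List.pyRange_one_singleton,
      List.foldl_append]
  simp [evaStep]

theorem evaFwd_zero (lines : List String) : evaFwd lines 0 = [] := by
  unfold evaFwd
  rw [PySem.List.pyRange_one_eq_nil (by simp)]
  simp

theorem evaLoopA_eq_evaFwd (lines : List String) :
    ∀ (n : Nat) (acc : List String),
      evaLoopA lines n acc = evaFwd lines n ++ acc := by
  intro n
  induction n with
  | zero =>
    intro acc
    rw [evaFwd_zero, List.nil_append]
    rfl
  | succ n ih =>
    intro acc
    by_cases hval :
        PySem.Str.startswith (PySem.Str.strip ((PySem.List.pyGet? lines (n : Int)).getD ""))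
          "// +kubebuilder:validation:" = true
    · -- validation line: appended on the B side, prepended to acc on the A side
      have hcom := startswith_val_imp_comment _ hval
      have hS : evaStartB lines (n+1) = evaStartB lines n := by
        simp only [evaStartB]
        rw [if_pos (by rw [hcom, Bool.or_true])]
      have hA : evaLoopA lines (n+1) acc =
          evaFwd lines n ++
            (PySem.Str.replace (PySem.Str.strip ((PySem.List.pyGet? lines (n : Int)).getD ""))
              "// +kubebuilder:validation:" "" :: acc) := by
        simp only [evaLoopA]
        rw [if_pos hval]
        exact ih _
      rw [hA, evaFwd_succ_of_skip lines n hS]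
      simp only [evaStep]
      rw [if_pos hval, List.append_assoc]
      rfl
    · by_cases hcb :
          ((PySem.Str.strip ((PySem.List.pyGet? lines (n : Int)).getD "")) == "" ||
            PySem.Str.startswith (PySem.Str.strip ((PySem.List.pyGet? lines (n : Int)).getD ""))
              "//") = true
      · -- blank line or other comment: skipped on both sides
        have hS : evaStartB lines (n+1) = evaStartB lines n := by
          simp only [evaStartB]
          rw [if_pos hcb]
        have hA : evaLoopA lines (n+1) acc = evaLoopA lines n acc := by
          simp only [evaLoopA]
          rw [if_neg hval]
          by_cases h2 :
              PySem.Str.startswith (PySem.Str.strip ((PySem.List.pyGet? lines (n : Int)).getD ""))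
                "//" = true
          · rw [if_pos h2]
          · rw [if_neg h2]
            have hblank :
                ((PySem.Str.strip ((PySem.List.pyGet? lines (n : Int)).getD "")) == "") = true := by
              rcases Bool.or_eq_true_iff.mp hcb with h | h
              · exact h
              · exact absurd h h2
            rw [if_pos hblank]
        rw [hA, ih, evaFwd_succ_of_skip lines n hS]
        simp only [evaStep]
        rw [if_neg hval]
      · -- real code line: the block starts here; both sides yield nothing new
        have hcb' := hcb
        simp only [Bool.or_eq_true_iff, not_or, Bool.not_eq_true] at hcb'
        have h2f : ¬ PySem.Str.startswith
            (PySem.Str.strip ((PySem.List.pyGet? lines (n : Int)).getD "")) "//" = true := by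
          rw [hcb'.2]; simp
        have h1f : ¬ ((PySem.Str.strip ((PySem.List.pyGet? lines (n : Int)).getD "")) == "") = true := by
          rw [hcb'.1]; simp
        have hA : evaLoopA lines (n+1) acc = acc := by
          simp only [evaLoopA]
          rw [if_neg hval, if_neg h2f, if_neg h1f]
        have hS : evaStartB lines (n+1) = n + 1 := by
          simp only [evaStartB]
          rw [if_neg hcb]
        rw [hA]
        unfold evaFwd
        rw [hS, PySem.List.pyRange_one_eq_nil le_rfl]
        simp

-- ===== VERDICT (by name: the statement is the Claim_ definition above) =====
theorem extract_validation_annotations_spec : Claim_equal_extract_validation_annotations := by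
  intro lines end_line _ _
  show extract_validation_annotations lines end_line = extract_validation_annotations_alt lines end_line
  have hA : extract_validation_annotations lines end_line = evaLoopA lines end_line.toNat [] := rfl
  have hB : extract_validation_annotations_alt lines end_line =
      (PySem.List.pyRange ((evaStartB lines end_line.toNat : Nat) : Int) end_line 1).foldl
        (evaStep lines) [] := rfl
  rw [hA, hB, evaLoopA_eq_evaFwd, List.append_nil]
  unfold evaFwd
  by_cases h : 0 ≤ end_line
  · rw [Int.toNat_of_nonneg h]
  · have h0 : ((end_line.toNat : Nat) : Int) = 0 := by omega
    rw [h0, PySem.List.pyRange_one_eq_nil (by simp),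
        PySem.List.pyRange_one_eq_nil (show end_line ≤ ((evaStartB lines end_line.toNat : Nat) : Int) by
          omega)]
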